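-- pv_equiv track=rewrite | github.com/pypi-data/pypi-mirror-399 | packages/goedels-poetry/goedels_poetry-1.2.4-py3-none-any.whl/goedels_poetry/agents/util/common.py | normalize_escape_sequences
-- ===== SOURCE A (Python) =====
-- def normalize_escape_sequences(content: str) -> str:
--     """
--     Convert literal escape sequences to their actual characters.
--
--     This function converts common escape sequences that appear as literal
--     two-character sequences (e.g., \\n, \\t) in strings to their actual
--     character equivalents (newline, tab, etc.). This is necessary because
--     some input sources may contain escape sequences as literal text rather than
--     actual escape sequences.
--
--     The function handles escaped backslashes (\\\\ -> \\) correctly by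
--     processing them appropriately to avoid double conversion.
--
--     Parameters
--     ----------
--     content: str
--         The content that may contain literal escape sequences
--
--     Returns
--     -------
--     str
--         The content with escape sequences converted to actual characters
--     """
--     # Use a character-based approach to handle escaped backslashes correctly
--     # Process character by character to distinguish \\n from \n
--     result = []
--     i = 0
--     while i < len(content):
--         if content[i] == "\\" and i + 1 < len(content):
--             next_char = content[i + 1]
--             if next_char == "\\":
--                 # Escaped backslash: preserve as single backslash
--                 result.append("\\")
--                 i += 2
--             elif next_char == "n":
--                 # Literal \n: convert to actual newline
--                 result.append("\n")
--                 i += 2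
--             elif next_char == "t":
--                 # Literal \t: convert to actual tab
--                 result.append("\t")
--                 i += 2
--             elif next_char == "r":
--                 # Literal \r: convert to actual carriage return
--                 result.append("\r")
--                 i += 2
--             else:
--                 # Backslash followed by something else: keep as-is
--                 result.append(content[i])
--                 i += 1
--         else:
--             result.append(content[i])
--             i += 1
--     return "".join(result)
-- ===== SOURCE B (Python) =====
-- def normalize_escape_sequences(content: str) -> str:
--     # Split on escaped backslashes so the remaining segments contain no "\\",
--     # substitute the lone escapes per segment, and rejoin with a single backslash.
--     parts = content.split("\\\\")
--     parts = [p.replace("\\n", "\n").replace("\\t", "\t").replace("\\r", "\r")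
--              for p in parts]
--     return "\\".join(parts)
-- ===== Notes on version B (the rewrite author's own statement) =====
-- stated objective: idiomatic
-- what changed: Replaced A's explicit index/lookahead character loop with a split-on-escaped-backslash / per-segment str.replace / join pipeline; the per-character Python loop disappears into C-implemented string methods.
import Mathlib
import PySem

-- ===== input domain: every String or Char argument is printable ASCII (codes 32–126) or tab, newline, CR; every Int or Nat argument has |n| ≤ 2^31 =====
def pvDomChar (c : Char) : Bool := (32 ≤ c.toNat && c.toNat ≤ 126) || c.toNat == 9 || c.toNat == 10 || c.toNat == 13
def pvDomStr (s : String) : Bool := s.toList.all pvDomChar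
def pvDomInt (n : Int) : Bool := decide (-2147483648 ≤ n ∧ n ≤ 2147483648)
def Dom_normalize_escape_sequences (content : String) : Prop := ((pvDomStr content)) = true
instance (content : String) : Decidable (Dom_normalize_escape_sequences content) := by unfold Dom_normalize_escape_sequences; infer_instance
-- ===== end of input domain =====

-- B replaces A's index/lookahead character state machine by the idiomatic
-- split-on-"\\" / per-segment replace / "\".join pipeline; same cost.

-- ===== PORT A =====
-- A's while-loop over indices, transliterated as structural recursion on the
-- character list: 'content[i] == "\\" and i + 1 < len(content)' is the outer
-- if plus the match on the rest; the inner branch chain is copied verbatim.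
def pvNormA : List Char → List Char
  | [] => []
  | c :: rest =>
    if c = '\\' then
      match rest with
      | [] => c :: pvNormA []              -- i+1 < len fails: append content[i]
      | d :: rest2 =>
        if d = '\\' then '\\' :: pvNormA rest2
        else if d = 'n' then '\n' :: pvNormA rest2
        else if d = 't' then '\t' :: pvNormA rest2
        else if d = 'r' then '\r' :: pvNormA rest2
        else '\\' :: pvNormA (d :: rest2)  -- append the backslash, i += 1
    else c :: pvNormA rest

def normalize_escape_sequences (content : String) : String :=
  String.ofList (pvNormA content.toList)

-- ===== PORT B =====
def normalize_escape_sequences_alt (content : String) : String :=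
  let parts := PySem.Chars.splitOn content.toList ['\\', '\\']
  let parts := parts.map (fun p =>
    PySem.Chars.replace
      (PySem.Chars.replace
        (PySem.Chars.replace p ['\\', 'n'] ['\n'])
        ['\\', 't'] ['\t'])
      ['\\', 'r'] ['\r'])
  String.ofList (PySem.Chars.join ['\\'] parts)

-- ===== PRECONDITION & SPEC =====
def Spec_normalize_escape_sequences (content : String) (out : String) : Prop := out = normalize_escape_sequences_alt content
instance (content : String) (out : String) : Decidable (Spec_normalize_escape_sequences content out) := by unfold Spec_normalize_escape_sequences; infer_instance

-- ===== CLAIM (what is proved, stated in full; the proofs are below) =====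
def Claim_equal_normalize_escape_sequences : Prop := ∀ (content : String), Dom_normalize_escape_sequences content → Spec_normalize_escape_sequences content (normalize_escape_sequences content)

-- ===== LEMMAS AND PROOFS =====

-- Clean (fuel-free) recursions characterising PySem's replace and splitOn for
-- a nonempty pattern oc :: ot.
def pvReplSpec (oc : Char) (ot : List Char) (new : List Char) : List Char → List Char
  | [] => []
  | c :: t =>
      if (oc :: ot).isPrefixOf (c :: t) then
        new ++ pvReplSpec oc ot new (t.drop ot.length)
      else c :: pvReplSpec oc ot new t
  termination_by l => l.length
  decreasing_by all_goals simp

def pvSplitSpec (sc : Char) (st : List Char) : List Char → List (List Char)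
  | [] => [[]]
  | c :: t =>
      if (sc :: st).isPrefixOf (c :: t) then
        [] :: pvSplitSpec sc st (t.drop st.length)
      else
        match pvSplitSpec sc st t with
        | [] => [[c]]
        | s :: ss => (c :: s) :: ss
  termination_by l => l.length
  decreasing_by all_goals simp

theorem pvReplace_go_eq (oc : Char) (ot new : List Char) :
    ∀ (fuel : Nat) (l acc : List Char), l.length ≤ fuel →
      PySem.Chars.replace.go (oc :: ot) new fuel l acc =
        acc.reverse ++ pvReplSpec oc ot new l := by
  intro fuel
  induction fuel with
  | zero =>
      intro l acc h
      have : l = [] := by cases l <;> simp_all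
      subst this
      simp [PySem.Chars.replace.go, pvReplSpec]
  | succ fuel ih =>
      intro l acc h
      cases l with
      | nil => simp [PySem.Chars.replace.go, pvReplSpec]
      | cons c t =>
          by_cases hp : (oc :: ot).isPrefixOf (c :: t)
          · have hlen : (t.drop ot.length).length ≤ fuel := by
              simp at h ⊢; omega
            simp only [PySem.Chars.replace.go, hp, if_true]
            rw [show (c :: t).drop (oc :: ot).length = t.drop ot.length by simp]
            rw [ih _ _ hlen]
            simp [pvReplSpec, hp]
          · have hlen : t.length ≤ fuel := by simp at h; omega
            simp only [PySem.Chars.replace.go, hp]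
            rw [ih _ _ hlen]
            simp [pvReplSpec, hp]

theorem pvReplace_eq (oc : Char) (ot new l : List Char) :
    PySem.Chars.replace l (oc :: ot) new = pvReplSpec oc ot new l := by
  have := pvReplace_go_eq oc ot new l.length l [] (le_refl _)
  simpa [PySem.Chars.replace] using this

theorem pvSplitSpec_ne_nil (sc : Char) (st : List Char) (l : List Char) :
    pvSplitSpec sc st l ≠ [] := by
  unfold pvSplitSpec
  cases l with
  | nil => simp
  | cons c t =>
      by_cases hp : (sc :: st).isPrefixOf (c :: t)
      · simp [hp]
      · simp only [hp]
        cases pvSplitSpec sc st t <;> simp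

theorem pvSplitOn_go_eq (sc : Char) (st : List Char) :
    ∀ (fuel : Nat) (l cur : List Char) (acc : List (List Char)),
      l.length + 1 ≤ fuel →
      PySem.Chars.splitOn.go (sc :: st) fuel l cur acc =
        acc.reverse ++
          (match pvSplitSpec sc st l with
           | [] => [cur.reverse]
           | s :: ss => (cur.reverse ++ s) :: ss) := by
  intro fuel
  induction fuel with
  | zero => intro l cur acc h; omega
  | succ fuel ih =>
      intro l cur acc h
      cases l with
      | nil => simp [PySem.Chars.splitOn.go, pvSplitSpec]
      | cons c t =>
          by_cases hp : (sc :: st).isPrefixOf (c :: t)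
          · have hlen : (t.drop st.length).length + 1 ≤ fuel := by
              simp at h ⊢; omega
            simp only [PySem.Chars.splitOn.go, hp, if_true]
            rw [show (c :: t).drop (sc :: st).length = t.drop st.length by simp]
            rw [ih _ _ _ hlen]
            rcases hd : pvSplitSpec sc st (t.drop st.length) with _ | ⟨s, ss⟩
            · exact absurd hd (pvSplitSpec_ne_nil sc st _)
            · simp [pvSplitSpec, hp, hd]
          · have hlen : t.length + 1 ≤ fuel := by simp at h; omega
            simp only [PySem.Chars.splitOn.go, hp]
            rw [ih _ _ _ hlen]
            rcases hd : pvSplitSpec sc st t with _ | ⟨s, ss⟩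
            · exact absurd hd (pvSplitSpec_ne_nil sc st t)
            · simp [pvSplitSpec, hp, hd]

theorem pvSplitOn_eq (sc : Char) (st : List Char) (l : List Char) :
    PySem.Chars.splitOn l (sc :: st) = pvSplitSpec sc st l := by
  have h := pvSplitOn_go_eq sc st (l.length + 1) l [] [] (le_refl _)
  rcases hd : pvSplitSpec sc st l with _ | ⟨s, ss⟩
  · exact absurd hd (pvSplitSpec_ne_nil sc st l)
  · simpa [PySem.Chars.splitOn, hd] using h

-- The three chained replaces applied to one segment.
def pvComp3 (p : List Char) : List Char :=
  pvReplSpec '\\' ['r'] ['\r']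
    (pvReplSpec '\\' ['t'] ['\t']
      (pvReplSpec '\\' ['n'] ['\n'] p))

-- Stepping lemmas for pvReplSpec.
theorem pvReplSpec_cons_ne (oc : Char) (ot new : List Char) (c : Char)
    (t : List Char) (h : c ≠ oc) :
    pvReplSpec oc ot new (c :: t) = c :: pvReplSpec oc ot new t := by
  rw [pvReplSpec]
  simp [List.isPrefixOf, Ne.symm h]

theorem pvReplSpec_hit (oc x : Char) (new : List Char) (c : Char)
    (t : List Char) (h : c = x) :
    pvReplSpec oc [x] new (oc :: c :: t) = new ++ pvReplSpec oc [x] new t := by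
  subst h
  rw [pvReplSpec]
  simp [List.isPrefixOf]

theorem pvReplSpec_miss (oc x : Char) (new : List Char) (c : Char)
    (t : List Char) (h : c ≠ x) :
    pvReplSpec oc [x] new (oc :: c :: t) = oc :: pvReplSpec oc [x] new (c :: t) := by
  rw [pvReplSpec]
  simp [List.isPrefixOf, Ne.symm h]

theorem pvComp3_nil : pvComp3 [] = [] := by
  simp [pvComp3, pvReplSpec]

theorem pvComp3_cons_ne (c : Char) (t : List Char) (h : c ≠ '\\') :
    pvComp3 (c :: t) = c :: pvComp3 t := by
  unfold pvComp3
  rw [pvReplSpec_cons_ne _ _ _ _ _ h, pvReplSpec_cons_ne _ _ _ _ _ h,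
      pvReplSpec_cons_ne _ _ _ _ _ h]

theorem pvComp3_bn (p : List Char) :
    pvComp3 ('\\' :: 'n' :: p) = ['\n'] ++ pvComp3 p := by
  unfold pvComp3
  rw [pvReplSpec_hit _ _ _ _ _ rfl]
  simp only [List.singleton_append]
  rw [pvReplSpec_cons_ne _ _ _ _ _ (by decide), pvReplSpec_cons_ne _ _ _ _ _ (by decide)]

theorem pvComp3_bt (p : List Char) :
    pvComp3 ('\\' :: 't' :: p) = ['\t'] ++ pvComp3 p := by
  unfold pvComp3
  rw [pvReplSpec_miss '\\' 'n' ['\n'] 't' p (by decide),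
      pvReplSpec_cons_ne '\\' ['n'] ['\n'] 't' p (by decide)]
  rw [pvReplSpec_hit '\\' 't' ['\t'] 't' _ rfl]
  simp only [List.singleton_append]
  rw [pvReplSpec_cons_ne '\\' ['r'] ['\r'] '\t' _ (by decide)]

theorem pvComp3_br (p : List Char) :
    pvComp3 ('\\' :: 'r' :: p) = ['\r'] ++ pvComp3 p := by
  unfold pvComp3
  rw [pvReplSpec_miss '\\' 'n' ['\n'] 'r' p (by decide),
      pvReplSpec_cons_ne '\\' ['n'] ['\n'] 'r' p (by decide)]
  rw [pvReplSpec_miss '\\' 't' ['\t'] 'r' _ (by decide),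
      pvReplSpec_cons_ne '\\' ['t'] ['\t'] 'r' _ (by decide)]
  rw [pvReplSpec_hit '\\' 'r' ['\r'] 'r' _ rfl]

theorem pvComp3_bc (c : Char) (p : List Char) (h1 : c ≠ '\\') (h2 : c ≠ 'n')
    (h3 : c ≠ 't') (h4 : c ≠ 'r') :
    pvComp3 ('\\' :: c :: p) = ['\\', c] ++ pvComp3 p := by
  unfold pvComp3
  rw [pvReplSpec_miss '\\' 'n' ['\n'] c p h2,
      pvReplSpec_cons_ne '\\' ['n'] ['\n'] c p h1]
  rw [pvReplSpec_miss '\\' 't' ['\t'] c _ h3,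
      pvReplSpec_cons_ne '\\' ['t'] ['\t'] c _ h1]
  rw [pvReplSpec_miss '\\' 'r' ['\r'] c _ h4,
      pvReplSpec_cons_ne '\\' ['r'] ['\r'] c _ h1]
  rfl

-- Intercalate stepping lemmas.
theorem pvInter_append (sep : List Char) (x y : List Char)
    (xs : List (List Char)) :
    sep.intercalate ((x ++ y) :: xs) = x ++ sep.intercalate (y :: xs) := by
  cases xs <;> simp [List.intercalate]

theorem pvInter_nil_cons (sep : List Char) (m : List Char)
    (ms : List (List Char)) :
    sep.intercalate ([] :: m :: ms) = sep ++ sep.intercalate (m :: ms) := by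
  simp [List.intercalate]

-- B's whole pipeline on a character list.
def pvG (l : List Char) : List Char :=
  List.intercalate ['\\'] ((pvSplitSpec '\\' ['\\'] l).map pvComp3)

theorem pvSplitSpec_cons_dest (c : Char) (t : List Char)
    (h : ¬ (['\\', '\\'] : List Char).isPrefixOf (c :: t)) :
    ∃ s ss, pvSplitSpec '\\' ['\\'] t = s :: ss ∧
      pvSplitSpec '\\' ['\\'] (c :: t) = (c :: s) :: ss := by
  rcases hd : pvSplitSpec '\\' ['\\'] t with _ | ⟨s, ss⟩
  · exact absurd hd (pvSplitSpec_ne_nil _ _ t)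
  · refine ⟨s, ss, rfl, ?_⟩
    rw [pvSplitSpec, if_neg h, hd]

-- pvG over each shape of the input, matching A's branches.
theorem pvG_nil : pvG [] = [] := by
  simp [pvG, pvSplitSpec, pvComp3_nil, List.intercalate]

theorem pvG_bb (t : List Char) : pvG ('\\' :: '\\' :: t) = '\\' :: pvG t := by
  unfold pvG
  rw [show pvSplitSpec '\\' ['\\'] ('\\' :: '\\' :: t)
        = [] :: pvSplitSpec '\\' ['\\'] t from by
    rw [pvSplitSpec]; simp [List.isPrefixOf]]
  rcases hd : pvSplitSpec '\\' ['\\'] t with _ | ⟨s, ss⟩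
  · exact absurd hd (pvSplitSpec_ne_nil _ _ t)
  · simp only [List.map, pvComp3_nil]
    rw [pvInter_nil_cons]
    rfl

theorem pvG_cons_ne (c : Char) (t : List Char) (h : c ≠ '\\') :
    pvG (c :: t) = c :: pvG t := by
  unfold pvG
  have hp : ¬ (['\\', '\\'] : List Char).isPrefixOf (c :: t) := by
    simp [List.isPrefixOf, Ne.symm h]
  obtain ⟨s, ss, hd, hc⟩ := pvSplitSpec_cons_dest c t hp
  rw [hc, hd]
  simp only [List.map]
  rw [pvComp3_cons_ne c s h]
  rw [show (c :: pvComp3 s : List Char) = [c] ++ pvComp3 s from rfl, pvInter_append]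
  rfl

theorem pvReplSpec_single_bs (x : Char) (nw : List Char) :
    pvReplSpec '\\' [x] nw ['\\'] = ['\\'] := by
  rw [pvReplSpec, if_neg (by simp [List.isPrefixOf]), pvReplSpec]

theorem pvG_single_bs : pvG ['\\'] = ['\\'] := by
  have h1 : pvSplitSpec '\\' ['\\'] ['\\'] = [['\\']] := by
    rw [pvSplitSpec, if_neg (by simp [List.isPrefixOf]), pvSplitSpec]
  have h2 : pvComp3 ['\\'] = ['\\'] := by
    unfold pvComp3
    rw [pvReplSpec_single_bs, pvReplSpec_single_bs, pvReplSpec_single_bs]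
  simp [pvG, h1, h2, List.intercalate]

theorem pvG_two (c : Char) (hc : c ≠ '\\') (out : List Char)
    (hcomp : ∀ p, pvComp3 ('\\' :: c :: p) = out ++ pvComp3 p) (t : List Char) :
    pvG ('\\' :: c :: t) = out ++ pvG t := by
  unfold pvG
  have hp : ¬ (['\\', '\\'] : List Char).isPrefixOf ('\\' :: c :: t) := by
    simp [List.isPrefixOf, Ne.symm hc]
  obtain ⟨s, ss, hd, hc1⟩ := pvSplitSpec_cons_dest '\\' (c :: t) hp
  have hp2 : ¬ (['\\', '\\'] : List Char).isPrefixOf (c :: t) := by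
    simp [List.isPrefixOf, Ne.symm hc]
  obtain ⟨s', ss', hd', hc2⟩ := pvSplitSpec_cons_dest c t hp2
  have he := hd.symm.trans hc2
  injection he with e1 e2
  subst e1; subst e2
  rw [hc1, hd']
  simp only [List.map]
  rw [hcomp s', pvInter_append]

theorem pv_main_aux : ∀ (n : Nat) (l : List Char), l.length ≤ n → pvNormA l = pvG l := by
  intro n
  induction n with
  | zero =>
      intro l h
      have : l = [] := by cases l <;> simp_all
      subst this
      rw [pvG_nil, pvNormA]
  | succ n ih =>
      intro l h
      cases l with
      | nil => rw [pvG_nil, pvNormA]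
      | cons c rest =>
        by_cases hc : c = '\\'
        · subst hc
          cases rest with
          | nil =>
              rw [pvG_single_bs]
              simp [pvNormA]
          | cons d rest2 =>
              have hlen : rest2.length ≤ n := by simp at h; omega
              have hlen2 : (d :: rest2).length ≤ n := by simp at h ⊢; omega
              rw [pvNormA]
              by_cases h1 : d = '\\'
              · subst h1
                rw [pvG_bb, ih rest2 hlen]
                simp
              · by_cases h2 : d = 'n'
                · subst h2
                  rw [pvG_two 'n' (by decide) ['\n'] pvComp3_bn rest2, ih rest2 hlen]
                  simp
                · by_cases h3 : d = 't'
                  · subst h3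
                    rw [pvG_two 't' (by decide) ['\t'] pvComp3_bt rest2, ih rest2 hlen]
                    simp
                  · by_cases h4 : d = 'r'
                    · subst h4
                      rw [pvG_two 'r' (by decide) ['\r'] pvComp3_br rest2, ih rest2 hlen]
                      simp
                    · rw [pvG_two d h1 ['\\', d] (fun p => pvComp3_bc d p h1 h2 h3 h4) rest2]
                      rw [show (['\\', d] ++ pvG rest2 : List Char)
                            = '\\' :: d :: pvG rest2 from rfl]
                      rw [← pvG_cons_ne d rest2 h1, ← ih (d :: rest2) hlen2]
                      simp [h1, h2, h3, h4]
        · have hlen : rest.length ≤ n := by simp at h; omega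
          rw [pvG_cons_ne c rest hc, ← ih rest hlen, pvNormA.eq_def]
          simp [hc]

theorem pv_main (l : List Char) : pvNormA l = pvG l :=
  pv_main_aux l.length l (le_refl _)

-- ===== VERDICT (by name: the statement is the Claim_ definition above) =====
theorem normalize_escape_sequences_spec : Claim_equal_normalize_escape_sequences := by
  intro content _
  unfold Spec_normalize_escape_sequences normalize_escape_sequences normalize_escape_sequences_alt
  rw [pv_main]
  unfold pvG
  rw [pvSplitOn_eq]
  congr 1
  unfold PySem.Chars.join
  congr 1
  apply List.map_congr_left
  intro p _
  rw [pvReplace_eq, pvReplace_eq, pvReplace_eq]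
  rfl
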